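-- pv_equiv track=rewrite | github.com/Ahmed-Abouzeid/PEGYPT | create_final_labeled_dataset.py | create_circles_edges
-- ===== SOURCE A (Python) =====
-- import collections
--
-- def create_circles_edges(circles_info_list):
--     circles = []
--     for bias, is_propaganda in circles_info_list:
--         if bias == 0 and is_propaganda == 0:
--             circles.append('A')
--         elif bias == -1 and is_propaganda == 0:
--             circles.append('B')
--         elif bias == 1 and is_propaganda == 0:
--             circles.append('C')
--         elif bias == 0 and is_propaganda == 1:
--             circles.append('D')
--         elif bias == -1 and is_propaganda == 1:
--             circles.append('E')
--         elif bias == 1 and is_propaganda == 1: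
--             circles.append('F')
--     return collections.Counter(circles)
-- ===== SOURCE B (Python) =====
-- import collections
--
-- _TABLE = {(0, 0): 'A', (-1, 0): 'B', (1, 0): 'C',
--           (0, 1): 'D', (-1, 1): 'E', (1, 1): 'F'}
--
-- def create_circles_edges(circles_info_list):
--     # Stage 1: aggregate the raw pairs themselves (no classification yet).
--     pair_counts = collections.Counter(tuple(p) for p in circles_info_list)
--     # Stage 2: relabel the aggregated distinct pairs -- one step per DISTINCT
--     # pair (at most six labelled ones), dropping pairs with no label.
--     # Since pair -> label is injective, first-occurrence order of labels is
--     # exactly the first-occurrence order of their pairs, so the Counter's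
--     # key order matches A's.
--     result = collections.Counter()
--     for pair, n in pair_counts.items():
--         label = _TABLE.get(pair)
--         if label is not None:
--             result[label] = n
--     return result
-- ===== Notes on version B (the rewrite author's own statement) =====
-- stated objective: alternative
-- what changed: Aggregate-then-relabel: B first counts the raw (bias, propaganda) pairs with one Counter, then relabels only the distinct aggregated pairs (at most six labelled ones) via a table, instead of A's classify-every-element-into-a-list-then-count; correct because pair-to-label is injective, so label counts and first-occurrence order are preserved.
import Mathlib
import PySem

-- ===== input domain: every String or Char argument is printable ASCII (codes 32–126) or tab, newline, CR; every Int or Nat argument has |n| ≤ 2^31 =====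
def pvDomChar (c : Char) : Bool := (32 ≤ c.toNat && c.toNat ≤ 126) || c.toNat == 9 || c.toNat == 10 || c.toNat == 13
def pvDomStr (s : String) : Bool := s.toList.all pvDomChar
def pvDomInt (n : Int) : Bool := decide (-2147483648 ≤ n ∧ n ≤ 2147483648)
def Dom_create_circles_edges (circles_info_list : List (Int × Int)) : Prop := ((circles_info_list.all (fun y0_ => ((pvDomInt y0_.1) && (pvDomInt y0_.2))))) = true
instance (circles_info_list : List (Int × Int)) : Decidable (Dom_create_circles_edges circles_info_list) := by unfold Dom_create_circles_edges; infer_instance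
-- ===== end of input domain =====

-- B aggregates the raw pairs into a Counter first and then relabels only the distinct aggregated
-- pairs through a table (aggregate-then-relabel), instead of A's classify-each-element-then-count.

-- ===== PORT A =====
def create_circles_edges (circles_info_list : List (Int × Int)) : List (String × Int) :=
  -- circles, the labelled list, is inlined into the final Counter call
  (PySem.Dict.counter (circles_info_list.foldl (fun acc p =>
    if p.1 == 0 && p.2 == 0 then acc ++ ["A"]
    else if p.1 == -1 && p.2 == 0 then acc ++ ["B"]
    else if p.1 == 1 && p.2 == 0 then acc ++ ["C"]
    else if p.1 == 0 && p.2 == 1 then acc ++ ["D"]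
    else if p.1 == -1 && p.2 == 1 then acc ++ ["E"]
    else if p.1 == 1 && p.2 == 1 then acc ++ ["F"]
    else acc) [])).items

-- ===== PORT B =====
def pvTable : PySem.Dict (Int × Int) String :=
  PySem.Dict.ofList [((0, 0), "A"), ((-1, 0), "B"), ((1, 0), "C"),
                     ((0, 1), "D"), ((-1, 1), "E"), ((1, 1), "F")]

def create_circles_edges_alt (circles_info_list : List (Int × Int)) : List (String × Int) :=
  -- Stage 1: count the raw pairs;  Stage 2: relabel the distinct aggregated pairs.
  ((PySem.Dict.counter circles_info_list).items.foldl (fun r pn =>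
    match pvTable.get? pn.1 with
    | some lab => r.insert lab pn.2
    | none => r) PySem.Dict.empty).items

-- ===== PRECONDITION & SPEC =====
def Spec_create_circles_edges (circles_info_list : List (Int × Int)) (out : List (String × Int)) : Prop := out = create_circles_edges_alt circles_info_list
instance (circles_info_list : List (Int × Int)) (out : List (String × Int)) : Decidable (Spec_create_circles_edges circles_info_list out) := by unfold Spec_create_circles_edges; infer_instance

-- ===== CLAIM (what is proved, stated in full; the proofs are below) =====
def Claim_equal_create_circles_edges : Prop := ∀ (circles_info_list : List (Int × Int)), Dom_create_circles_edges circles_info_list → Spec_create_circles_edges circles_info_list (create_circles_edges circles_info_list)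

-- ===== LEMMAS AND PROOFS =====

/-- The label A's if/elif ladder (and B's table) associates to a pair. -/
def pvLabel (p : Int × Int) : Option String :=
  if p.1 = 0 ∧ p.2 = 0 then some "A"
  else if p.1 = -1 ∧ p.2 = 0 then some "B"
  else if p.1 = 1 ∧ p.2 = 0 then some "C"
  else if p.1 = 0 ∧ p.2 = 1 then some "D"
  else if p.1 = -1 ∧ p.2 = 1 then some "E"
  else if p.1 = 1 ∧ p.2 = 1 then some "F"
  else none

theorem pvTable_get (p : Int × Int) : pvTable.get? p = pvLabel p := by
  obtain ⟨b, q⟩ := p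
  have : pvTable = PySem.Dict.mk [((0, 0), "A"), ((-1, 0), "B"), ((1, 0), "C"),
                   ((0, 1), "D"), ((-1, 1), "E"), ((1, 1), "F")] := by decide
  rw [this]
  simp only [PySem.Dict.get?_mk_cons, pvLabel, beq_iff_eq, Prod.mk.injEq]
  split_ifs <;> first | rfl | (simp only [PySem.Dict.get?, List.find?]; rfl) | omega

/-- pair → label is injective where defined. -/
theorem pvLabel_inj {p q : Int × Int} {lab : String}
    (hp : pvLabel p = some lab) (hq : pvLabel q = some lab) : p = q := by
  obtain ⟨a, b⟩ := p; obtain ⟨c, d⟩ := q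
  unfold pvLabel at hp hq
  split_ifs at hp hq <;> simp_all [Prod.ext_iff] <;> (subst hp; exact absurd hq (by decide))

/-- A's ladder step appends exactly the label of the pair (if any). -/
theorem pvStepA (acc : List String) (p : Int × Int) :
    (if p.1 == 0 && p.2 == 0 then acc ++ ["A"]
     else if p.1 == -1 && p.2 == 0 then acc ++ ["B"]
     else if p.1 == 1 && p.2 == 0 then acc ++ ["C"]
     else if p.1 == 0 && p.2 == 1 then acc ++ ["D"]
     else if p.1 == -1 && p.2 == 1 then acc ++ ["E"]
     else if p.1 == 1 && p.2 == 1 then acc ++ ["F"]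
     else acc) = acc ++ (pvLabel p).toList := by
  simp only [pvLabel, Bool.and_eq_true, beq_iff_eq]
  split_ifs <;> simp_all

theorem pvA_circles (xs : List (Int × Int)) (acc : List String) :
    xs.foldl (fun acc p =>
      if p.1 == 0 && p.2 == 0 then acc ++ ["A"]
      else if p.1 == -1 && p.2 == 0 then acc ++ ["B"]
      else if p.1 == 1 && p.2 == 0 then acc ++ ["C"]
      else if p.1 == 0 && p.2 == 1 then acc ++ ["D"]
      else if p.1 == -1 && p.2 == 1 then acc ++ ["E"]
      else if p.1 == 1 && p.2 == 1 then acc ++ ["F"]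
      else acc) acc = acc ++ xs.filterMap pvLabel := by
  induction xs generalizing acc with
  | nil => simp
  | cons p xs ih =>
    rw [List.foldl_cons, pvStepA, ih, List.filterMap_cons]
    cases pvLabel p <;> simp

theorem pvDiscard_none {s : List (Int × Int)} {x : Int × Int} (hx : pvLabel x = none) :
    (PySem.Set.discard s x).filterMap pvLabel = s.filterMap pvLabel := by
  induction s with
  | nil => rfl
  | cons q s ih =>
    by_cases hq : q = x
    · subst hq
      simp_all [PySem.Set.discard]
    · simp_all [PySem.Set.discard, List.filterMap_cons]

theorem pvDiscard_some {s : List (Int × Int)} {p : Int × Int} {lab : String}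
    (hp : pvLabel p = some lab) :
    PySem.Set.discard (s.filterMap pvLabel) lab = (PySem.Set.discard s p).filterMap pvLabel := by
  induction s with
  | nil => rfl
  | cons q s ih =>
    by_cases hq : q = p
    · subst hq
      simp_all [PySem.Set.discard]
    · cases hql : pvLabel q with
      | none => simp_all [PySem.Set.discard]
      | some lab' =>
        have hne : lab' ≠ lab := fun h => hq (pvLabel_inj hql (h ▸ hp) |>.symm ▸ rfl)
        simp_all [PySem.Set.discard]

theorem pvOfList_filterMap (xs : List (Int × Int)) :
    PySem.Set.ofList (xs.filterMap pvLabel) = (PySem.Set.ofList xs).filterMap pvLabel := by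
  induction xs with
  | nil => rfl
  | cons p xs ih =>
    cases hp : pvLabel p with
    | none =>
      simp only [List.filterMap_cons, hp, PySem.Set.ofList_cons, ih, pvDiscard_none hp]
    | some lab =>
      simp only [List.filterMap_cons, hp, PySem.Set.ofList_cons, ih, pvDiscard_some hp]

theorem pvCount (xs : List (Int × Int)) {p : Int × Int} {lab : String}
    (hp : pvLabel p = some lab) :
    (xs.filterMap pvLabel).count lab = xs.count p := by
  induction xs with
  | nil => rfl
  | cons q xs ih =>
    by_cases hq : q = p
    · subst hq
      simp [hp, ih]
    · cases hql : pvLabel q with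
      | none => simp [hql, ih, hq]
      | some lab' =>
        have hne : lab' ≠ lab := fun h => hq (pvLabel_inj hql (h ▸ hp))
        simp [hql, ih, hq, hne]

/-- B's second stage: folding the labelled inserts over the distinct pairs. -/
theorem pvFoldB (s : List (Int × Int)) (c : (Int × Int) → Int) (d : PySem.Dict String Int)
    (hnd : s.Nodup)
    (hdis : ∀ q ∈ s, ∀ lab, pvLabel q = some lab → d.contains lab = false) :
    ((s.map (fun p => (p, c p))).foldl (fun r pn =>
        match pvLabel pn.1 with
        | some lab => r.insert lab pn.2
        | none => r) d).items
      = d.items ++ s.filterMap (fun p => (pvLabel p).map (fun lab => (lab, c p))) := by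
  induction s generalizing d with
  | nil => simp
  | cons p s ih =>
    simp only [List.map_cons, List.foldl_cons, List.filterMap_cons, List.nodup_cons] at *
    cases hp : pvLabel p with
    | none =>
      rw [ih _ hnd.2 (fun q hq lab h => hdis q (List.mem_cons_of_mem _ hq) lab h)]
      simp
    | some lab =>
      have hfresh : d.contains lab = false := hdis p (List.mem_cons_self) lab hp
      rw [ih _ hnd.2 ?_]
      · rw [PySem.Dict.items_insert_of_not_contains _ _ hfresh]
        simp
      · intro q hq lab' h
        rw [PySem.Dict.contains_insert]
        have hne : lab' ≠ lab := fun he => hnd.1 (pvLabel_inj h (he ▸ hp) ▸ hq)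
        simp [hne, hdis q (List.mem_cons_of_mem _ hq) lab' h]

-- ===== VERDICT (by name: the statement is the Claim_ definition above) =====
theorem create_circles_edges_spec : Claim_equal_create_circles_edges := by
  intro xs _
  unfold Spec_create_circles_edges create_circles_edges create_circles_edges_alt
  rw [pvA_circles xs []]
  simp only [List.nil_append]
  have hfn : (fun (r : PySem.Dict String Int) (pn : (Int × Int) × Int) =>
      match pvTable.get? pn.1 with
      | some lab => r.insert lab pn.2
      | none => r)
      = (fun r pn => match pvLabel pn.1 with
        | some lab => r.insert lab pn.2
        | none => r) := by
    funext r pn; rw [pvTable_get]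
  rw [hfn, PySem.Dict.items_counter, PySem.Dict.items_counter,
    pvFoldB (PySem.Set.ofList xs) (fun p => (xs.count p : Int)) PySem.Dict.empty
      (PySem.Set.nodup_ofList xs) (by intro q _ lab _; rfl)]
  rw [pvOfList_filterMap, List.map_filterMap]
  show (PySem.Set.ofList xs).filterMap _ = [] ++ (PySem.Set.ofList xs).filterMap _
  rw [List.nil_append]
  refine List.filterMap_congr ?_
  intro p _
  cases hp : pvLabel p with
  | none => rfl
  | some lab => simp [Option.map_some, pvCount xs hp]
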